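-- pv_equiv track=rewrite | github.com/17wook2/Algorithm | 프로그래머스/신고결과받기.py | solution
-- ===== SOURCE A (Python) =====
-- def solution(id_list, report, k):
--     answer = []
--     report = list(set(report))  ## 중복 제거
--     ban_dictionary = {}
--     getReport = {}
--     for r in report:
--         a, b = r.split()
--         if b not in ban_dictionary:
--             ban_dictionary[b] = [a]
--         else:
--             ban_dictionary[b].append(a)
--     for blist in ban_dictionary:
--         if len(ban_dictionary[blist]) >= k:  ## 정지 당했다면
--             for idl in ban_dictionary[blist]:
--                 if idl not in getReport:
--                     getReport[idl] = 1
--                 else: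
--                     getReport[idl] += 1
--     for idl in id_list:
--         if idl not in getReport:
--             answer.append(0)
--         else:
--             answer.append(getReport[idl])
--
--     return answer
-- ===== SOURCE B (Python) =====
-- def solution(id_list, report, k):
--     times_reported = {}   # reported user -> number of deduplicated reports against them
--     reported_by = {}      # reporter -> list of users they reported (deduplicated entries)
--     for r in set(report):
--         a, b = r.split()
--         reported_by.setdefault(a, []).append(b)
--         times_reported[b] = times_reported.get(b, 0) + 1
--     return [sum(1 for b in reported_by.get(i, []) if times_reported[b] >= k)
--             for i in id_list]
-- ===== Notes on version B (the rewrite author's own statement) =====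
-- stated objective: simpler
-- what changed: B inverts A's grouping: a single pass over the deduplicated reports builds a per-target report counter together with a per-reporter list of targets, and each answer is then computed on demand by scanning that reporter's own target list for users with >= k reports - A's dict of per-banned-user reporter lists, its nested re-scan and its precomputed reporter-score dict all disappear.
import Mathlib
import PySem

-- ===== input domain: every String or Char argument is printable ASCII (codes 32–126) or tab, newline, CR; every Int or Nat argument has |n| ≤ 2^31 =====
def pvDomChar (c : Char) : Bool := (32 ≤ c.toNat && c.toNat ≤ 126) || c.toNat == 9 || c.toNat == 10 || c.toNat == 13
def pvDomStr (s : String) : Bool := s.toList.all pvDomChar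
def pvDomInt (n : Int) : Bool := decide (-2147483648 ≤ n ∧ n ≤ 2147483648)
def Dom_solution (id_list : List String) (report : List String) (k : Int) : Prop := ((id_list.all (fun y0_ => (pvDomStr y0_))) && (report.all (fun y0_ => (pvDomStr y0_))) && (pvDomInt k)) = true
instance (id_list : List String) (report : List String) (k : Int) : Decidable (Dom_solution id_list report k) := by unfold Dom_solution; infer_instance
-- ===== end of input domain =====

-- B inverts A's grouping: one pass builds a per-target counter plus per-reporter target lists,
-- and each answer is counted on demand from the reporter's own list; same cost, simpler structure.


-- ===== PORT A =====
-- 'report = list(set(report))' iterates a Python set: its order is not modelled, but every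
-- consumer below (dict values used only as counts/lengths, lookups by key) is order-independent,
-- so Set.ofList (first-occurrence order) is value-faithful.  'a, b = r.split()' raises unless
-- the split has exactly two tokens (excluded by Pre_solution); the getD defaults are placeholders
-- reached only outside Pre_solution.
def solution (id_list : List String) (report : List String) (k : Int) : List Int :=
  let report' := PySem.Set.ofList report
  let ban_dictionary := report'.foldl (fun d r =>
      let parts := PySem.Str.split₀ r
      let a := parts.getD 0 ""
      let b := parts.getD 1 ""
      if d.contains b = false then d.insert b [a] else d.modify b [] (fun l => l ++ [a]))
    PySem.Dict.empty
  let getReport := ban_dictionary.keys.foldl (fun g blist =>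
      if k ≤ ((ban_dictionary.getD blist []).length : Int) then
        (ban_dictionary.getD blist []).foldl (fun g idl =>
          if g.contains idl = false then g.insert idl 1 else g.modify idl 0 (fun n => n + 1)) g
      else g)
    PySem.Dict.empty
  id_list.foldl (fun answer idl =>
      if getReport.contains idl = false then answer ++ [(0 : Int)]
      else answer ++ [getReport.getD idl 0]) []

-- ===== PORT B =====
-- One pass over set(report) builds times_reported (target -> # dedup reports) and reported_by
-- (reporter -> list of targets); each answer is 'sum(1 for b in reported_by.get(i, []) if
-- times_reported[b] >= k)', ported as countP (times_reported[b] always hits: b was inserted).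
def solution_alt (id_list : List String) (report : List String) (k : Int) : List Int :=
  let st := (PySem.Set.ofList report).foldl
      (fun (st : PySem.Dict String (List String) × PySem.Dict String Int) r =>
        let p := PySem.Str.split₀ r
        let a := p.getD 0 ""
        let b := p.getD 1 ""
        (st.1.modify a [] (fun l => l ++ [b]), st.2.modify b 0 (fun n => n + 1)))
      (PySem.Dict.empty, PySem.Dict.empty)
  id_list.map (fun i =>
    (((st.1.getD i []).countP (fun b => decide (k ≤ st.2.getD b 0)) : Nat) : Int))

-- ===== PRECONDITION & SPEC =====
-- A's 'a, b = r.split()' raises ValueError unless every report string splits into exactly two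
-- whitespace-separated tokens; Pre_ excludes exactly those raising inputs (B raises there too).
def Pre_solution (_id_list : List String) (report : List String) (_k : Int) : Prop :=
  ∀ r ∈ report, (PySem.Str.split₀ r).length = 2
instance (id_list : List String) (report : List String) (k : Int) : Decidable (Pre_solution id_list report k) := by unfold Pre_solution; infer_instance
def pvWitness_solution : List String × List String × Int :=
  (["muzi", "frodo", "apeach", "neo"], ["muzi frodo", "apeach frodo", "frodo neo", "muzi neo", "apeach muzi"], 2)

def Spec_solution (id_list : List String) (report : List String) (k : Int) (out : List Int) : Prop := out = solution_alt id_list report k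
instance (id_list : List String) (report : List String) (k : Int) (out : List Int) : Decidable (Spec_solution id_list report k out) := by unfold Spec_solution; infer_instance

-- ===== CLAIM (what is proved, stated in full; the proofs are below) =====
def Claim_equal_solution : Prop := ∀ (id_list : List String) (report : List String) (k : Int), Dom_solution id_list report k → Pre_solution id_list report k → Spec_solution id_list report k (solution id_list report k)

-- ===== LEMMAS AND PROOFS =====

-- d.get(k) misses ⇒ default
lemma getD_of_not_contains {ν : Type} (d : PySem.Dict String ν) (x : String) (dflt : ν)
    (h : d.contains x = false) : d.getD x dflt = dflt := by
  have hc := PySem.Dict.contains_eq_isSome_get? d x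
  rw [h] at hc
  unfold PySem.Dict.getD
  cases hg : d.get? x with
  | none => rfl
  | some v => rw [hg] at hc; simp at hc

-- A's "if key missing: d[b]=[a] else: d[b].append(a)" is a single modify
lemma ban_step_eq :
    (fun (d : PySem.Dict String (List String)) (p : String × String) =>
        if d.contains p.2 = false then d.insert p.2 [p.1] else d.modify p.2 [] (fun l => l ++ [p.1]))
    = fun d p => d.modify p.2 [] (fun l => l ++ [p.1]) := by
  funext d p
  by_cases h : d.contains p.2 = false
  · simp only [h, if_true, PySem.Dict.modify, getD_of_not_contains _ _ _ h, List.nil_append]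
  · simp [h]

-- A's "if key missing: g[a]=1 else: g[a]+=1" is a single modify
lemma count_step_eq :
    (fun (g : PySem.Dict String Int) (a : String) =>
        if g.contains a = false then g.insert a 1 else g.modify a 0 (fun n => n + 1))
    = fun g a => g.modify a 0 (fun n => n + 1) := by
  funext g a
  by_cases h : g.contains a = false
  · simp only [h, if_true, PySem.Dict.modify, getD_of_not_contains _ _ _ h, Int.zero_add]
  · simp [h]

-- counting with two disjoint tests splits
lemma countP_or_disjoint {α : Type} (l : List α) (P Q : α → Bool)
    (h : ∀ a ∈ l, ¬(P a = true ∧ Q a = true)) :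
    l.countP (fun a => P a || Q a) = l.countP P + l.countP Q := by
  induction l with
  | nil => simp
  | cons x xs ih =>
    simp only [List.countP_cons]
    rw [ih (fun a ha => h a (List.mem_cons_of_mem _ ha))]
    have := h x (List.mem_cons_self ..)
    cases hp : P x <;> cases hq : Q x <;> simp_all <;> omega

-- the reporters of b, among the swapped pairs sp = (reported, reporter)
def alist (sp : List (String × String)) (b : String) : List String :=
  (sp.filter (fun p => p.1 == b)).map Prod.snd

lemma count_alist (sp : List (String × String)) (b i : String) :
    List.count i (alist sp b) = sp.countP (fun p => (p.1 == b) && (p.2 == i)) := by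
  unfold alist
  rw [List.count_eq_countP, List.countP_map, List.countP_filter]
  refine List.countP_congr (fun p _ => ?_)
  simp [Bool.and_comm]

lemma length_alist (sp : List (String × String)) (b : String) :
    (alist sp b).length = sp.countP (fun p => p.1 == b) := by
  unfold alist
  rw [List.length_map, ← List.countP_eq_length_filter]

-- characterization of A's getReport accumulation over a duplicate-free key list
lemma A_outer (k : Int) (sp : List (String × String)) (bs : List String) (i : String) :
    ∀ (g : PySem.Dict String Int), bs.Nodup →
    (bs.foldl (fun g b =>
        if k ≤ ((alist sp b).length : Int) then
          (alist sp b).foldl (fun g a => g.modify a 0 (fun n => n + 1)) g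
        else g) g).getD i 0
      = g.getD i 0 +
        (sp.countP (fun p => decide (p.1 ∈ bs) &&
            (decide (k ≤ ((alist sp p.1).length : Int)) && (p.2 == i))) : Int) := by
  induction bs with
  | nil => intro g _; simp
  | cons b bs ih =>
    intro g hnd
    obtain ⟨hb, hnd'⟩ := List.nodup_cons.mp hnd
    simp only [List.foldl_cons]
    by_cases h : k ≤ ((alist sp b).length : Int)
    · rw [if_pos h, ih _ hnd', PySem.Dict.getD_foldl_modify_add_one]
      have hfun : (fun (p : String × String) => decide (p.1 ∈ b :: bs) &&
              (decide (k ≤ ((alist sp p.1).length : Int)) && (p.2 == i)))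
          = fun p => ((p.1 == b) && (p.2 == i)) ||
              (decide (p.1 ∈ bs) && (decide (k ≤ ((alist sp p.1).length : Int)) && (p.2 == i))) := by
        funext p
        by_cases hpb : p.1 = b
        · have hmem : p.1 ∉ bs := by rw [hpb]; exact hb
          simp [hpb, h]
        · simp [hpb, List.mem_cons]
      rw [hfun, countP_or_disjoint _ _ _ (by
        intro p _ hpq
        obtain ⟨h1, h2⟩ := hpq
        have hpb : p.1 = b := by
          have := Bool.and_elim_left h1
          simpa using this
        have : p.1 ∈ bs := by
          have := Bool.and_elim_left h2
          simpa using this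
        exact hb (hpb ▸ this))]
      rw [count_alist]
      push_cast
      ring
    · rw [if_neg h, ih _ hnd']
      congr 2
      refine List.countP_congr (fun p _ => ?_)
      by_cases hpb : p.1 = b
      · simp [hpb, h]
      · simp [hpb, List.mem_cons]

-- the crux: for every id, A's getReport value equals B's on-demand count (generic in the pair list)
lemma crux (k : Int) (pairs : List (String × String)) (i : String) :
    (let ban := pairs.foldl (fun d p => d.modify p.2 [] (fun l => l ++ [p.1])) PySem.Dict.empty
     (ban.keys.foldl (fun g blist =>
        if k ≤ ((ban.getD blist []).length : Int) then
          (ban.getD blist []).foldl (fun g a => g.modify a 0 (fun n => n + 1)) g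
        else g) (PySem.Dict.empty : PySem.Dict String Int)).getD i 0)
    = (let tgt := pairs.foldl (fun d p => d.modify p.1 [] (fun l => l ++ [p.2]))
          (PySem.Dict.empty : PySem.Dict String (List String))
       let cnt := pairs.foldl (fun d p => d.modify p.2 0 (fun n => n + 1))
          (PySem.Dict.empty : PySem.Dict String Int)
       (((tgt.getD i []).countP (fun b => decide (k ≤ cnt.getD b 0)) : Nat) : Int)) := by
  have hsp : pairs.foldl (fun d p => d.modify p.2 [] (fun l => l ++ [p.1])) PySem.Dict.empty
      = (pairs.map Prod.swap).foldl (fun d p => d.modify p.1 [] (fun l => l ++ [p.2]))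
          PySem.Dict.empty := by
    rw [List.foldl_map]
    rfl
  have hget : ∀ b, (pairs.foldl (fun d p => d.modify p.2 [] (fun l => l ++ [p.1]))
        PySem.Dict.empty).getD b []
      = alist (pairs.map Prod.swap) b := by
    intro b
    rw [hsp, PySem.Dict.getD_foldl_modify_append]
    unfold alist
    rfl
  have hkeys : (pairs.foldl (fun d p => d.modify p.2 [] (fun l => l ++ [p.1]))
        PySem.Dict.empty).keys
      = PySem.Set.ofList ((pairs.map Prod.swap).map Prod.fst) := by
    rw [hsp, PySem.Dict.keys_foldl_modify_key (key := Prod.fst) (d0 := ([] : List String))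
      (f := fun (_ : PySem.Dict String (List String)) (p : String × String) => fun l => l ++ [p.2])]
    exact PySem.Set.update_nil_left _
  have hcnt : ∀ b, (pairs.foldl (fun d p => d.modify p.2 0 (fun n => n + 1))
        PySem.Dict.empty).getD b 0
      = ((pairs.map Prod.snd).count b : Int) := by
    intro b
    have hm := List.foldl_map (f := Prod.snd)
        (g := fun (d : PySem.Dict String Int) x => d.modify x 0 (fun n => n + 1))
        (l := pairs) (init := (PySem.Dict.empty : PySem.Dict String Int))
    rw [← hm, PySem.Dict.getD_foldl_modify_add_one]
    simp
  have htgt : (pairs.foldl (fun d p => d.modify p.1 [] (fun l => l ++ [p.2]))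
        (PySem.Dict.empty : PySem.Dict String (List String))).getD i []
      = (pairs.filter (fun p => p.1 == i)).map (fun p => p.2) := by
    rw [PySem.Dict.getD_foldl_modify_append]
    rfl
  have hlen : ∀ b, ((alist (pairs.map Prod.swap) b).length : Int)
      = ((pairs.map Prod.snd).count b : Int) := by
    intro b
    rw [length_alist, List.countP_map, List.count_eq_countP, List.countP_map]
    rfl
  simp only [hget, hkeys, hcnt, htgt]
  -- B's side: a countP over the reporter's own targets is a countP over all pairs
  have hB : ((pairs.filter (fun p => p.1 == i)).map (fun p => p.2)).countP
        (fun b => decide (k ≤ ((pairs.map Prod.snd).count b : Int)))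
      = pairs.countP (fun p =>
          decide (k ≤ ((pairs.map Prod.snd).count p.2 : Int)) && (p.1 == i)) := by
    rw [List.countP_map, List.countP_filter]
    rfl
  rw [hB]
  refine (A_outer k (pairs.map Prod.swap)
      (PySem.Set.ofList ((pairs.map Prod.swap).map Prod.fst)) i
      PySem.Dict.empty (PySem.Set.nodup_ofList _)).trans ?_
  simp only [List.countP_map, PySem.Dict.getD_empty]
  rw [Int.zero_add]
  congr 1
  refine List.countP_congr (fun p hp => ?_)
  have hmem : p.2 ∈ (pairs.map Prod.swap).map Prod.fst := by
    simp only [List.map_map]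
    exact List.mem_map.mpr ⟨p, hp, rfl⟩
  simp only [Function.comp, Prod.fst_swap, Prod.snd_swap, PySem.Set.mem_ofList, hmem,
    decide_true, Bool.true_and, hlen, Bool.and_comm]

-- A's answer loop over id_list is a map of getReport lookups
lemma final_loop (g : PySem.Dict String Int) (l : List String) :
    l.foldl (fun answer idl =>
        if g.contains idl = false then answer ++ [(0 : Int)]
        else answer ++ [g.getD idl 0]) []
      = l.map (fun i => g.getD i 0) := by
  have h : (fun (answer : List Int) idl =>
        if g.contains idl = false then answer ++ [(0 : Int)]
        else answer ++ [g.getD idl 0])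
      = fun answer idl => answer ++ [g.getD idl 0] := by
    funext ans idl
    by_cases h : g.contains idl = false
    · simp [h, getD_of_not_contains _ _ _ h]
    · simp [h]
  rw [h, PySem.List.foldl_append_singleton_eq_map]
  simp

-- the two full programs agree (no hypotheses needed: both are total Lean functions)
lemma solution_eq (id_list : List String) (report : List String) (k : Int) :
    solution id_list report k = solution_alt id_list report k := by
  simp only [solution, solution_alt]
  have h1 : (PySem.Set.ofList report).foldl
      (fun d r =>
        let parts := PySem.Str.split₀ r
        let a := parts.getD 0 ""
        let b := parts.getD 1 ""
        if d.contains b = false then d.insert b [a] else d.modify b [] (fun l => l ++ [a]))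
      PySem.Dict.empty
    = ((PySem.Set.ofList report).map (fun r =>
        let p := PySem.Str.split₀ r
        (p.getD 0 "", p.getD 1 ""))).foldl
      (fun d p => if d.contains p.2 = false then d.insert p.2 [p.1]
        else d.modify p.2 [] (fun l => l ++ [p.1])) PySem.Dict.empty := by
    rw [List.foldl_map]
  have h2 : (PySem.Set.ofList report).foldl
      (fun (st : PySem.Dict String (List String) × PySem.Dict String Int) r =>
        let p := PySem.Str.split₀ r
        let a := p.getD 0 ""
        let b := p.getD 1 ""
        (st.1.modify a [] (fun l => l ++ [b]), st.2.modify b 0 (fun n => n + 1)))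
      (PySem.Dict.empty, PySem.Dict.empty)
    = ((PySem.Set.ofList report).map (fun r =>
        let p := PySem.Str.split₀ r
        (p.getD 0 "", p.getD 1 ""))).foldl
      (fun (st : PySem.Dict String (List String) × PySem.Dict String Int) p =>
        (st.1.modify p.1 [] (fun l => l ++ [p.2]), st.2.modify p.2 0 (fun n => n + 1)))
      (PySem.Dict.empty, PySem.Dict.empty) := by
    rw [List.foldl_map]
  rw [h1, ban_step_eq, h2,
    PySem.List.foldl_prod_mk
      (f := fun (d : PySem.Dict String (List String)) (p : String × String) =>
        d.modify p.1 [] (fun l => l ++ [p.2]))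
      (g := fun (d : PySem.Dict String Int) (p : String × String) =>
        d.modify p.2 0 (fun n => n + 1))]
  simp only [count_step_eq]
  rw [final_loop]
  exact List.map_congr_left (fun i _ => crux k _ i)

-- ===== VERDICT (by name: the statement is the Claim_ definition above) =====
theorem solution_spec : Claim_equal_solution := by
  intro id_list report k _ _
  exact solution_eq id_list report k
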